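-- pv_equiv track=rewrite | github.com/tastaslim/Python-Tutorial | day9_data_structures/lists/striver.py | traffic
-- ===== SOURCE A (Python) =====
-- def traffic(n: int, m: int, vehicle: [int]) -> int:
--     final_count = 0
--     for i in range(n):
--         temp_count, j, count = 0, i, m
--         while j < n:
--             if vehicle[j] == 1:
--                 temp_count += 1
--             elif count > 0:
--                 temp_count += 1
--                 count -= 1
--             elif count <= 0:
--                 temp_count = 0
--             j += 1
--         final_count = max(final_count, temp_count)
--     return final_count
-- ===== SOURCE B (Python) =====
-- def traffic(n: int, m: int, vehicle: [int]) -> int: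
--     # One reverse pass: count non-1 entries in the suffix; the best window is the
--     # longest suffix whose non-1 count fits in the available flips.
--     flips = m if m > 0 else 0
--     best = 0
--     zeros = 0
--     for i in range(n - 1, -1, -1):
--         if vehicle[i] != 1:
--             zeros += 1
--         if zeros <= flips:
--             best = n - i
--     return best
-- ===== Notes on version B (the rewrite author's own statement) =====
-- stated objective: faster
-- what changed: A restarts a full scan of vehicle[i:n] for every start index i; B makes a single reverse pass keeping a running count of non-1 entries in the suffix and records the longest suffix whose count fits in the available flips, which equals A's answer.
import Mathlib
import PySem

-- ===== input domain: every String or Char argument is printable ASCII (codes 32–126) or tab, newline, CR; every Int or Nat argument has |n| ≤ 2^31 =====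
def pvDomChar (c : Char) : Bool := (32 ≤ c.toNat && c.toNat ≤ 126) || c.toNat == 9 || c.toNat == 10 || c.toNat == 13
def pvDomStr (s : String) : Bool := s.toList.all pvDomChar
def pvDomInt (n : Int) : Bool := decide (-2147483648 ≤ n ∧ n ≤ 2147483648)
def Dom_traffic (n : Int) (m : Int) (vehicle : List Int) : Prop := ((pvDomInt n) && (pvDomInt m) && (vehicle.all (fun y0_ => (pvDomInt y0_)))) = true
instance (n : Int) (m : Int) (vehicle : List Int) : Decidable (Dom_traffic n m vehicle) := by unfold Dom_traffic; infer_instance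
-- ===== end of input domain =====

-- B replaces A's quadratic restart-per-index scan by a single reverse pass
-- (suffix count of non-1 entries); objective: faster (O(n^2) → O(n)).

-- ===== PORT A =====
def traffic (n : Int) (m : Int) (vehicle : List Int) : Int :=
  (PySem.List.pyRange 0 n 1).foldl
    (fun final_count i =>
      let r := (PySem.List.pyRange i n 1).foldl
        (fun (s : Int × Int) j =>
          if PySem.List.pyGetD vehicle j 0 == 1 then (s.1 + 1, s.2)
          else if s.2 > 0 then (s.1 + 1, s.2 - 1)
          else if s.2 ≤ 0 then (0, s.2)
          else s)
        (0, m)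
      max final_count r.1)
    0

-- ===== PORT B =====
def traffic_alt (n : Int) (m : Int) (vehicle : List Int) : Int :=
  let flips : Int := if m > 0 then m else 0
  let r := (PySem.List.pyRange (n - 1) (-1) (-1)).foldl
    (fun (s : Int × Int) i =>
      let zeros := if PySem.List.pyGetD vehicle i 0 ≠ 1 then s.2 + 1 else s.2
      (if zeros ≤ flips then n - i else s.1, zeros))
    (0, 0)
  r.1

-- ===== PRECONDITION & SPEC =====
-- Pre_ excludes exactly the inputs where Python A raises IndexError: n > len(vehicle).
def Pre_traffic (n : Int) (m : Int) (vehicle : List Int) : Prop :=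
  n ≤ (vehicle.length : Int)
instance (n : Int) (m : Int) (vehicle : List Int) : Decidable (Pre_traffic n m vehicle) := by
  unfold Pre_traffic; infer_instance
def pvWitness_traffic : Int × Int × List Int := (4, 1, [1, 0, 1, 0])

def Spec_traffic (n : Int) (m : Int) (vehicle : List Int) (out : Int) : Prop := out = traffic_alt n m vehicle
instance (n : Int) (m : Int) (vehicle : List Int) (out : Int) : Decidable (Spec_traffic n m vehicle out) := by unfold Spec_traffic; infer_instance

-- ===== CLAIM (what is proved, stated in full; the proofs are below) =====
def Claim_equal_traffic : Prop := ∀ (n : Int) (m : Int) (vehicle : List Int), Dom_traffic n m vehicle → Pre_traffic n m vehicle → Spec_traffic n m vehicle (traffic n m vehicle)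

-- ===== LEMMAS AND PROOFS =====

-- number of non-1 entries of a list
def zCount : List Int → Int
  | [] => 0
  | x :: tl => (if x == 1 then 0 else 1) + zCount tl

-- length of the longest suffix whose zCount is ≤ f (0 if none)
def hSuf (f : Int) : List Int → Int
  | [] => 0
  | x :: tl => if zCount (x :: tl) ≤ f then ((x :: tl).length : Int) else hSuf f tl

-- the body of A's inner while-loop, on the list value
def stepA (s : Int × Int) (v : Int) : Int × Int :=
  if v == 1 then (s.1 + 1, s.2)
  else if s.2 > 0 then (s.1 + 1, s.2 - 1)
  else if s.2 ≤ 0 then (0, s.2)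
  else s

-- A's outer loop as structural recursion over suffixes
def mxA (m : Int) : List Int → Int
  | [] => 0
  | x :: tl => max (List.foldl stepA (0, m) (x :: tl)).1 (mxA m tl)

lemma zC_nonneg (l : List Int) : 0 ≤ zCount l := by
  induction l with
  | nil => simp [zCount]
  | cons x tl ih => simp only [zCount]; split <;> omega

lemma zC_append (a b : List Int) : zCount (a ++ b) = zCount a + zCount b := by
  induction a with
  | nil => simp [zCount]
  | cons x tl ih => simp only [List.cons_append, zCount, ih]; ring

lemma hS_nonneg (f : Int) (l : List Int) : 0 ≤ hSuf f l := by
  induction l with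
  | nil => simp [hSuf]
  | cons x tl ih => simp only [hSuf]; split <;> omega

lemma hS_le_len (f : Int) (l : List Int) : hSuf f l ≤ (l.length : Int) := by
  induction l with
  | nil => simp [hSuf]
  | cons x tl ih =>
    simp only [hSuf]; split
    · omega
    · simp only [List.length_cons]; push_cast; omega

lemma hS_neg (f : Int) (l : List Int) (hf : f < 0) : hSuf f l = 0 := by
  induction l with
  | nil => simp [hSuf]
  | cons x tl ih =>
    have h1 := zC_nonneg (x :: tl)
    simp only [hSuf, ih]
    rw [if_neg (by omega)]

lemma hS_full (f : Int) (l : List Int) (h : zCount l ≤ f) : hSuf f l = (l.length : Int) := by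
  cases l with
  | nil => simp [hSuf]
  | cons x tl => simp only [hSuf]; rw [if_pos h]

lemma hS_mono0 (f : Int) (l : List Int) (hf : 0 ≤ f) : hSuf 0 l ≤ hSuf f l := by
  induction l with
  | nil => simp [hSuf]
  | cons x tl ih =>
    simp only [hSuf]
    by_cases h0 : zCount (x :: tl) ≤ 0
    · rw [if_pos h0, if_pos (by omega)]
    · rw [if_neg h0]
      by_cases hf' : zCount (x :: tl) ≤ f
      · rw [if_pos hf']
        have := hS_le_len f tl
        simp only [List.length_cons]; push_cast; omega
      · rw [if_neg hf']; exact ih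

lemma hS_cons_neg (f x : Int) (tl : List Int) (h : ¬ zCount (x :: tl) ≤ f) :
    hSuf f (x :: tl) = hSuf f tl := by
  simp only [hSuf]; rw [if_neg h]

lemma stepA_one (tc c x : Int) (h : x = 1) : stepA (tc, c) x = (tc + 1, c) := by
  simp [stepA, h]

lemma stepA_flip (tc c x : Int) (h1 : ¬ x = 1) (h2 : c > 0) :
    stepA (tc, c) x = (tc + 1, c - 1) := by
  simp [stepA, h1, h2]

lemma stepA_reset (tc c x : Int) (h1 : ¬ x = 1) (h2 : ¬ c > 0) : stepA (tc, c) x = (0, c) := by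
  have h3 : c ≤ 0 := by omega
  simp [stepA, h1, h2, h3]

lemma inner_char (l : List Int) : ∀ tc c : Int,
    (List.foldl stepA (tc, c) l).1 =
      if zCount l ≤ max c 0 then tc + (l.length : Int) else hSuf 0 l := by
  induction l with
  | nil =>
    intro tc c
    rw [if_pos (show zCount [] ≤ max c 0 from by simp [zCount])]
    simp
  | cons x tl ih =>
    intro tc c
    have hz := zC_nonneg tl
    have hmax0 : (0 : Int) ≤ max c 0 := le_max_right c 0
    rw [List.foldl_cons]
    by_cases hx' : x = 1
    · have hzc : zCount (x :: tl) = zCount tl := by simp [zCount, hx']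
      rw [stepA_one tc c x hx', ih, hzc]
      by_cases h : zCount tl ≤ max c 0
      · rw [if_pos h, if_pos h]
        simp only [List.length_cons]; push_cast; ring
      · rw [if_neg h, if_neg h, hS_cons_neg 0 x tl (by rw [hzc]; omega)]
    · have hzc : zCount (x :: tl) = 1 + zCount tl := by simp [zCount, hx']
      by_cases hc : c > 0
      · rw [stepA_flip tc c x hx' hc, ih, hzc]
        have hmax : max (c - 1) 0 = c - 1 := by omega
        rw [hmax]
        by_cases hcc : zCount tl ≤ c - 1
        · rw [if_pos hcc, if_pos (by omega)]
          simp only [List.length_cons]; push_cast; ring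
        · rw [if_neg hcc, if_neg (show ¬ (1 + zCount tl ≤ max c 0) by omega),
            hS_cons_neg 0 x tl (by rw [hzc]; omega)]
      · rw [stepA_reset tc c x hx' hc, ih, hzc]
        have hmax : max c 0 = 0 := by omega
        rw [hmax, if_neg (show ¬ (1 + zCount tl ≤ (0 : Int)) by omega),
          hS_cons_neg 0 x tl (by rw [hzc]; omega)]
        by_cases h0 : zCount tl ≤ 0
        · rw [if_pos h0, hS_full 0 tl (by omega)]; ring
        · rw [if_neg h0]

lemma mx_eq_h (m : Int) (l : List Int) : mxA m l = hSuf (max m 0) l := by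
  induction l with
  | nil => simp [mxA, hSuf]
  | cons x tl ih =>
    have hf0 : (0 : Int) ≤ max m 0 := le_max_right m 0
    rw [mxA, inner_char, ih]
    by_cases h : zCount (x :: tl) ≤ max m 0
    · rw [if_pos h, hS_full _ _ h]
      have h1 := hS_le_len (max m 0) tl
      have : hSuf (max m 0) tl ≤ ((x :: tl).length : Int) := by
        simp only [List.length_cons]; push_cast; omega
      simp only [zero_add]
      exact max_eq_left this
    · rw [if_neg h]
      have hz : ¬ zCount (x :: tl) ≤ 0 := by omega
      have h1 : hSuf 0 (x :: tl) = hSuf 0 tl := by simp only [hSuf]; rw [if_neg hz]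
      have h2 : hSuf (max m 0) (x :: tl) = hSuf (max m 0) tl := by
        simp only [hSuf]; rw [if_neg h]
      rw [h1, h2]
      exact max_eq_right (hS_mono0 _ tl hf0)

lemma A_fold (m : Int) (v : List Int) : ∀ acc : Int, 0 ≤ acc →
    List.foldl (fun fc k => max fc (List.foldl stepA (0, m) (v.drop k)).1) acc
      (List.range v.length) = max acc (mxA m v) := by
  induction v with
  | nil => intro acc h; simpa [mxA] using (max_eq_left h).symm
  | cons x tl ih =>
    intro acc h
    rw [List.length_cons, List.range_succ_eq_map]
    simp only [List.foldl_cons, List.foldl_map, List.drop_zero, List.drop_succ_cons]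
    rw [ih _ (le_trans h (le_max_left _ _))]
    show max (max acc (List.foldl stepA (stepA (0, m) x) tl).1) (mxA m tl) =
      max acc (max (List.foldl stepA (stepA (0, m) x) tl).1 (mxA m tl))
    rw [max_assoc]

lemma hS_append_singleton (f : Int) (ys : List Int) (x : Int) :
    hSuf f (ys ++ [x]) = if zCount [x] ≤ f then hSuf (f - zCount [x]) ys + 1 else 0 := by
  induction ys with
  | nil =>
    simp only [List.nil_append]
    by_cases h : zCount [x] ≤ f
    · rw [if_pos h, hS_full f [x] h]
      simp [hSuf]
    · rw [if_neg h, hS_cons_neg f x [] h]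
      simp [hSuf]
  | cons y t ih =>
    rw [List.cons_append]
    have hz1 : zCount (y :: (t ++ [x])) = zCount (y :: t) + zCount [x] := by
      have := zC_append (y :: t) [x]
      rw [List.cons_append] at this
      exact this
    have hzyt := zC_nonneg (y :: t)
    have hzx := zC_nonneg [x]
    have hzt := zC_nonneg t
    have hztx : zCount (t ++ [x]) = zCount t + zCount [x] := zC_append t [x]
    have hlen : ((y :: (t ++ [x])).length : Int) = ((y :: t).length : Int) + 1 := by
      simp only [List.length_cons, List.length_append, List.length_nil]
      push_cast; ring
    by_cases h : zCount (y :: (t ++ [x])) ≤ f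
    · rw [hS_full f _ h, hlen, if_pos (show zCount [x] ≤ f by
        have hzyc : zCount (y :: t) = (if y == 1 then 0 else 1) + zCount t := rfl
        have : (0:Int) ≤ (if y == 1 then 0 else 1) := by split <;> omega
        omega),
        hS_full (f - zCount [x]) (y :: t) (by omega)]
    · rw [hS_cons_neg f y (t ++ [x]) h, ih]
      by_cases hx : zCount [x] ≤ f
      · rw [if_pos hx, if_pos hx,
          hS_cons_neg (f - zCount [x]) y t (by omega)]
      · rw [if_neg hx, if_neg hx]

lemma B_fold (f N : Int) (v : List Int) : ∀ b0 z0 : Int,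
    List.foldl
      (fun (s : Int × Int) i =>
        let zeros := if PySem.List.pyGetD v i 0 ≠ 1 then s.2 + 1 else s.2
        (if zeros ≤ f then N - i else s.1, zeros))
      (b0, z0) (PySem.List.pyRange ((v.length : Int) - 1) (-1) (-1)) =
    (if 0 < hSuf (f - z0) v then N - ((v.length : Int) - hSuf (f - z0) v) else b0,
      z0 + zCount v) := by
  induction v using List.reverseRecOn with
  | nil =>
    intro b0 z0
    rw [PySem.List.pyRange_neg_one_eq_nil (by simp)]
    simp [hSuf, zCount]
  | append_singleton ys x ih =>
    intro b0 z0
    have hlen : ((ys ++ [x]).length : Int) - 1 = (ys.length : Int) := by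
      simp only [List.length_append, List.length_cons, List.length_nil]
      push_cast; ring
    have hlen2 : ((ys ++ [x]).length : Int) = (ys.length : Int) + 1 := by omega
    rw [hlen, PySem.List.pyRange_neg_one_cons (show (-1 : Int) < (ys.length : Int) by omega)]
    have hget : PySem.List.pyGetD (ys ++ [x]) ((ys.length : Nat) : Int) 0 = x := by
      rw [PySem.List.pyGetD_eq_getElem _ _ (by omega) (by
        simp only [List.length_append, List.length_cons, List.length_nil]; omega)]
      simp
    have hcongr : ∀ init : Int × Int,
        List.foldl
          (fun (s : Int × Int) i =>
            let zeros := if PySem.List.pyGetD (ys ++ [x]) i 0 ≠ 1 then s.2 + 1 else s.2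
            (if zeros ≤ f then N - i else s.1, zeros))
          init (PySem.List.pyRange ((ys.length : Int) - 1) (-1) (-1)) =
        List.foldl
          (fun (s : Int × Int) i =>
            let zeros := if PySem.List.pyGetD ys i 0 ≠ 1 then s.2 + 1 else s.2
            (if zeros ≤ f then N - i else s.1, zeros))
          init (PySem.List.pyRange ((ys.length : Int) - 1) (-1) (-1)) := by
      intro init
      apply PySem.List.foldl_congr_mem'
      intro i hi acc
      rw [PySem.List.mem_pyRange_neg_one] at hi
      have h0 : 0 ≤ i := by omega
      have h1 : i < (ys.length : Int) := by omega
      have hgi : PySem.List.pyGetD (ys ++ [x]) i 0 = PySem.List.pyGetD ys i 0 := by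
        rw [PySem.List.pyGetD_eq_getElem _ _ h0 (by
            simp only [List.length_append, List.length_cons, List.length_nil]; omega),
          PySem.List.pyGetD_eq_getElem _ _ h0 (by exact_mod_cast h1)]
        rw [List.getElem_append_left (by omega)]
      simp only [hgi]
    simp only [List.foldl_cons, hget]
    rw [hcongr, ih]
    have hzx : zCount [x] = (if x == 1 then 0 else 1) := by simp [zCount]
    have hzx0 : (0 : Int) ≤ zCount [x] := zC_nonneg [x]
    have hz1 : (if x ≠ 1 then z0 + 1 else z0) = z0 + zCount [x] := by
      rw [hzx]; by_cases hxx : x = 1 <;> simp [hxx]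
    rw [hz1, hS_append_singleton (f - z0) ys x, zC_append ys [x], hlen2,
      show f - (z0 + zCount [x]) = f - z0 - zCount [x] from by ring]
    have hnn := hS_nonneg (f - z0 - zCount [x]) ys
    have hll := hS_le_len (f - z0 - zCount [x]) ys
    by_cases hx : zCount [x] ≤ f - z0
    · rw [if_pos hx, if_pos (show (0:Int) < hSuf (f - z0 - zCount [x]) ys + 1 by omega)]
      by_cases hpos : 0 < hSuf (f - z0 - zCount [x]) ys
      · rw [if_pos hpos]
        simp only [Prod.mk.injEq]
        constructor <;> omega
      · rw [if_neg hpos, if_pos (show z0 + zCount [x] ≤ f by omega)]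
        simp only [Prod.mk.injEq]
        constructor <;> omega
    · have h00 : hSuf (f - z0 - zCount [x]) ys = 0 := hS_neg _ _ (by omega)
      rw [if_neg hx, if_neg (show ¬ (0:Int) < 0 by omega),
        if_neg (show ¬ 0 < hSuf (f - z0 - zCount [x]) ys by omega),
        if_neg (show ¬ z0 + zCount [x] ≤ f by omega)]
      simp only [Prod.mk.injEq]
      exact ⟨trivial, by omega⟩

lemma traffic_zero (n m : Int) (vehicle : List Int) (hn : n ≤ 0) :
    traffic n m vehicle = 0 := by
  unfold traffic
  rw [PySem.List.pyRange_one_eq_nil hn]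
  rfl

lemma traffic_alt_zero (n m : Int) (vehicle : List Int) (hn : n ≤ 0) :
    traffic_alt n m vehicle = 0 := by
  unfold traffic_alt
  rw [PySem.List.pyRange_neg_one_eq_nil (by omega)]
  rfl

lemma take_len (n : Int) (vehicle : List Int) (h0 : 0 < n) (h : n ≤ (vehicle.length : Int)) :
    ((vehicle.take n.toNat).length : Int) = n := by
  rw [List.length_take]
  have : n.toNat ≤ vehicle.length := by omega
  rw [min_eq_left this]
  omega

lemma get_take (n i : Int) (vehicle : List Int) (h : n ≤ (vehicle.length : Int))
    (h0 : 0 ≤ i) (h1 : i < n) :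
    PySem.List.pyGetD vehicle i 0 = PySem.List.pyGetD (vehicle.take n.toNat) i 0 := by
  have hlen : ((vehicle.take n.toNat).length : Int) = n := take_len n vehicle (by omega) h
  rw [PySem.List.pyGetD_eq_getElem _ _ h0 (by omega),
    PySem.List.pyGetD_eq_getElem _ _ h0 (by omega)]
  rw [List.getElem_take]

lemma traffic_eq (n m : Int) (vehicle : List Int) (h0 : 0 < n)
    (h : n ≤ (vehicle.length : Int)) :
    traffic n m vehicle = hSuf (max m 0) (vehicle.take n.toNat) := by
  set v := vehicle.take n.toNat with hv
  have hlen : ((v.length : Nat) : Int) = n := take_len n vehicle h0 h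
  unfold traffic
  rw [← hlen, PySem.List.pyRange_zero_nat, List.foldl_map]
  have houter :
      List.foldl
        (fun final_count (k : Nat) =>
          let r := (PySem.List.pyRange ((k : Int)) ((v.length : Int)) 1).foldl
            (fun (s : Int × Int) j =>
              if PySem.List.pyGetD vehicle j 0 == 1 then (s.1 + 1, s.2)
              else if s.2 > 0 then (s.1 + 1, s.2 - 1)
              else if s.2 ≤ 0 then (0, s.2)
              else s)
            (0, m)
          max final_count r.1)
        0 (List.range v.length) =
      List.foldl
        (fun fc k => max fc (List.foldl stepA (0, m) (v.drop k)).1)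
        0 (List.range v.length) := by
    apply PySem.List.foldl_congr_mem'
    intro k hk acc
    rw [List.mem_range] at hk
    simp only
    have hinner :
        (PySem.List.pyRange ((k : Int)) ((v.length : Int)) 1).foldl
          (fun (s : Int × Int) j =>
            if PySem.List.pyGetD vehicle j 0 == 1 then (s.1 + 1, s.2)
            else if s.2 > 0 then (s.1 + 1, s.2 - 1)
            else if s.2 ≤ 0 then (0, s.2)
            else s)
          (0, m) =
        (PySem.List.pyRange ((k : Int)) ((v.length : Int)) 1).foldl
          (fun (s : Int × Int) j => stepA s (PySem.List.pyGetD v j 0)) (0, m) := by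
      apply PySem.List.foldl_congr_mem'
      intro j hj acc'
      rw [PySem.List.mem_pyRange_one] at hj
      have hget : PySem.List.pyGetD vehicle j 0 = PySem.List.pyGetD v j 0 := by
        apply get_take n j vehicle h (by omega)
        omega
      rw [hget, stepA]
    rw [hinner, PySem.List.foldl_pyRange_pyGetD' v 0 stepA ((0 : Int), m)
      (Int.natCast_nonneg k)]
    rw [Int.toNat_natCast]
  rw [houter, A_fold, mx_eq_h]
  · exact max_eq_right (hS_nonneg _ _)
  · exact le_rfl

lemma traffic_alt_eq (n m : Int) (vehicle : List Int) (h0 : 0 < n)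
    (h : n ≤ (vehicle.length : Int)) :
    traffic_alt n m vehicle = hSuf (max m 0) (vehicle.take n.toNat) := by
  set v := vehicle.take n.toNat with hv
  have hlen : ((v.length : Nat) : Int) = n := take_len n vehicle h0 h
  unfold traffic_alt
  simp only
  have hflips : (if m > 0 then m else 0) = max m 0 := by
    split <;> omega
  rw [hflips]
  have hcongr :
      List.foldl
        (fun (s : Int × Int) i =>
          let zeros := if PySem.List.pyGetD vehicle i 0 ≠ 1 then s.2 + 1 else s.2
          (if zeros ≤ max m 0 then n - i else s.1, zeros))
        (0, 0) (PySem.List.pyRange (n - 1) (-1) (-1)) =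
      List.foldl
        (fun (s : Int × Int) i =>
          let zeros := if PySem.List.pyGetD v i 0 ≠ 1 then s.2 + 1 else s.2
          (if zeros ≤ max m 0 then n - i else s.1, zeros))
        (0, 0) (PySem.List.pyRange (n - 1) (-1) (-1)) := by
    apply PySem.List.foldl_congr_mem'
    intro i hi acc
    rw [PySem.List.mem_pyRange_neg_one] at hi
    have hget : PySem.List.pyGetD vehicle i 0 = PySem.List.pyGetD v i 0 :=
      get_take n i vehicle h (by omega) (by omega)
    rw [hget]
  rw [hcongr, show n - 1 = ((v.length : Int)) - 1 from by omega, B_fold (max m 0) n v 0 0]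
  have hnn := hS_nonneg (max m 0 - 0) v
  have hll := hS_le_len (max m 0 - 0) v
  by_cases hpos : 0 < hSuf (max m 0 - 0) v
  · rw [if_pos hpos]
    simp only [sub_zero] at *
    omega
  · rw [if_neg hpos]
    simp only [sub_zero] at *
    omega

-- ===== VERDICT (by name: the statement is the Claim_ definition above) =====
theorem traffic_spec : Claim_equal_traffic := by
  intro n m vehicle hdom hpre
  simp only [Spec_traffic]
  by_cases hn : n ≤ 0
  · rw [traffic_zero n m vehicle hn, traffic_alt_zero n m vehicle hn]
  · rw [traffic_eq n m vehicle (by omega) hpre, traffic_alt_eq n m vehicle (by omega) hpre]
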